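-- pv_equiv track=rewrite | github.com/mineee1014/algorithm | baekjoon/2057.py | func
-- ===== SOURCE A (Python) =====
-- def func(n,dd):
--     if n == 1 or n == 0 or n == 2:
--         return 'YES'
--     f = 1
--     i = 1
--     while f*(i+1) <= n:
--         i += 1
--         f *= i
--     if i == dd:
--         return 'NO'
--     else:
--         return func(n-f,i)
-- ===== SOURCE B (Python) =====
-- def func(n, dd):
--     # Build the factorial table once, then do a single descending greedy scan
--     # over it (instead of A's tail recursion re-deriving the largest factorial
--     # from scratch at every level).
--     if n == 0 or n == 1 or n == 2:
--         return 'YES'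
--     facts = [1, 1]
--     while facts[-1] * len(facts) <= n:
--         facts.append(facts[-1] * len(facts))
--     prev = dd
--     for j in range(len(facts) - 1, 0, -1):
--         f = facts[j]
--         if f <= n:
--             if j == prev:
--                 return 'NO'
--             n -= f
--             if n == 0 or n == 1 or n == 2:
--                 return 'YES'
--             if n >= f:
--                 return 'NO'
--             prev = j
--     return 'NO'
-- ===== Notes on version B (the rewrite author's own statement) =====
-- stated objective: alternative
-- what changed: A's tail recursion re-derives the largest factorial from scratch (f=i=1 upward) at every level; B builds the factorial table once as a list and then answers with a single descending greedy scan over that table, detecting 'NO' locally (index equal to the previous one, or the remainder still at least the current factorial).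
import Mathlib
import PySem

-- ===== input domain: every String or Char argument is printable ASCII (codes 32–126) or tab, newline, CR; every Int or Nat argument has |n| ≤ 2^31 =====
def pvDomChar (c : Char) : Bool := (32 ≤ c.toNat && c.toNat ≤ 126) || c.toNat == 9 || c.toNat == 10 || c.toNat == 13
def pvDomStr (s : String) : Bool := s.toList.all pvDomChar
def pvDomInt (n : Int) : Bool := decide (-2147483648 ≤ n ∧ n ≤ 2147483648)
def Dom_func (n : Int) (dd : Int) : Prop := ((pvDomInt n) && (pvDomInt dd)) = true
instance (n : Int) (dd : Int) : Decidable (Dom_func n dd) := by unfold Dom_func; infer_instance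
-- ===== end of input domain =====

-- B replaces A's tail recursion (which re-derives the largest factorial from
-- scratch at every level) by one construction of the factorial table as a list
-- followed by a single descending greedy scan over it; objective: alternative
-- (same value everywhere).  Recursions are fuel-based purely to make them
-- structural; the fuel is provably never exhausted.

-- ===== PORT A =====
-- A's `while f*(i+1) <= n: i += 1; f *= i` loop (fuel only makes it structural;
-- the loop runs at most n.toNat times, see pvAscendF_spec below)
def pvAscendF : Nat → Int → Int → Int → Int × Int
  | 0, _, f, i => (f, i)
  | fuel + 1, n, f, i =>
    if f * (i + 1) ≤ n then pvAscendF fuel n (f * (i + 1)) (i + 1) else (f, i)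

-- A's tail recursion `return func(n-f, i)` (fuel n.toNat + 3 bounds its depth:
-- n shrinks by f ≥ 1 each level, and a negative n returns within two levels)
def pvFuncF : Nat → Int → Int → String
  | 0, _, _ => ""
  | fuel + 1, n, dd =>
    if n = 1 ∨ n = 0 ∨ n = 2 then "YES"
    else
      if (pvAscendF (n.toNat + 1) n 1 1).2 = dd then "NO"
      else pvFuncF fuel (n - (pvAscendF (n.toNat + 1) n 1 1).1) (pvAscendF (n.toNat + 1) n 1 1).2

def func (n dd : Int) : String := pvFuncF (n.toNat + 3) n dd

-- ===== PORT B =====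
-- Source B's `while facts[-1] * len(facts) <= n: facts.append(...)` table
-- construction (the last element at least doubles each turn, so fuel
-- n.toNat + 2 is never exhausted, see pvBuildF_spec below)
def pvBuildF : Nat → Int → List Int → List Int
  | 0, _, facts => facts
  | fuel + 1, n, facts =>
    if facts.getLastD 1 * (facts.length : Int) ≤ n then
      pvBuildF fuel n (facts ++ [facts.getLastD 1 * (facts.length : Int)])
    else facts

-- Source B's `for j in range(len(facts)-1, 0, -1)` greedy scan; j is the current
-- index, j = 0 means the range is exhausted
def pvScan (facts : List Int) (j : Nat) (n prev : Int) : String :=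
  match j with
  | 0 => "NO"
  | Nat.succ j' =>
    if facts.getD (j' + 1) 0 ≤ n then
      if ((j' + 1 : Nat) : Int) = prev then "NO"
      else if n - facts.getD (j' + 1) 0 = 0 ∨ n - facts.getD (j' + 1) 0 = 1 ∨
              n - facts.getD (j' + 1) 0 = 2 then "YES"
      else if facts.getD (j' + 1) 0 ≤ n - facts.getD (j' + 1) 0 then "NO"
      else pvScan facts j' (n - facts.getD (j' + 1) 0) ((j' + 1 : Nat) : Int)
    else pvScan facts j' n prev

def func_alt (n dd : Int) : String :=
  if n = 0 ∨ n = 1 ∨ n = 2 then "YES"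
  else pvScan (pvBuildF (n.toNat + 2) n [1, 1])
              ((pvBuildF (n.toNat + 2) n [1, 1]).length - 1) n dd

-- ===== PRECONDITION & SPEC =====
def Spec_func (n : Int) (dd : Int) (out : String) : Prop := out = func_alt n dd
instance (n : Int) (dd : Int) (out : String) : Decidable (Spec_func n dd out) := by unfold Spec_func; infer_instance

-- ===== CLAIM (what is proved, stated in full; the proofs are below) =====
def Claim_equal_func : Prop := ∀ (n : Int) (dd : Int), Dom_func n dd → Spec_func n dd (func n dd)

-- ===== LEMMAS AND PROOFS =====

-- i! as an Int: the value both loops maintain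
def factI (i : Int) : Int := (Nat.factorial i.toNat : Int)

theorem factI_succ (i : Int) (hi : 0 ≤ i) : factI (i + 1) = factI i * (i + 1) := by
  have h : (i + 1).toNat = i.toNat + 1 := by omega
  unfold factI
  rw [h, Nat.factorial_succ]
  push_cast
  have h2 : ((i.toNat : Int)) = i := by omega
  rw [h2]; ring

theorem factI_cast (m : Nat) : factI (m : Int) = (Nat.factorial m : Int) := by
  unfold factI
  simp

theorem factI_mono (a b : Int) (hab : a ≤ b) : factI a ≤ factI b := by
  unfold factI
  have := Nat.factorial_le (show a.toNat ≤ b.toNat by omega)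
  omega

theorem pvAscendF_spec : ∀ (fuel : Nat) (n f i : Int), 1 ≤ f → 1 ≤ i →
    f = factI i → (i = 1 ∨ f ≤ n) → (n + 1 - f).toNat < fuel →
    1 ≤ (pvAscendF fuel n f i).2 ∧
    (pvAscendF fuel n f i).1 = factI (pvAscendF fuel n f i).2 ∧
    n < factI ((pvAscendF fuel n f i).2 + 1) ∧
    ((pvAscendF fuel n f i).2 = 1 ∨ (pvAscendF fuel n f i).1 ≤ n) := by
  intro fuel
  induction fuel with
  | zero => intro n f i hf hi h1 h2 hm; omega
  | succ fuel ih =>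
    intro n f i hf hi h1 h2 hm
    rw [pvAscendF]
    by_cases hc : f * (i + 1) ≤ n
    · rw [if_pos hc]
      have hstep : f * (i + 1) = factI (i + 1) := by rw [factI_succ i (by omega), ← h1]
      have hgrow : f + 1 ≤ f * (i + 1) := by nlinarith
      exact ih n (f * (i + 1)) (i + 1) (by omega) (by omega) hstep (Or.inr hc) (by omega)
    · rw [if_neg hc]
      refine ⟨hi, h1, ?_, h2⟩
      rw [factI_succ i (by omega), ← h1]
      omega

-- the largest i ≥ 1 with i! ≤ n is unique (in the form both programs produce it)
theorem pv_unique (n a b : Int) (ha1 : 1 ≤ a) (hb1 : 1 ≤ b)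
    (ha2 : n < factI (a + 1)) (ha3 : a = 1 ∨ factI a ≤ n)
    (hb2 : n < factI (b + 1)) (hb3 : b = 1 ∨ factI b ≤ n) : a = b := by
  rcases lt_trichotomy a b with h | h | h
  · exfalso
    have hbn : factI b ≤ n := by
      rcases hb3 with h1 | h1
      · omega
      · exact h1
    have := factI_mono (a + 1) b (by omega)
    omega
  · exact h
  · exfalso
    have han : factI a ≤ n := by
      rcases ha3 with h1 | h1
      · omega
      · exact h1
    have := factI_mono (b + 1) a (by omega)
    omega

-- recursion-depth measure of A's tail recursion
def pvMu (n dd : Int) : Nat := if n < 0 then (if dd = 1 then 0 else 1) else n.toNat + 2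

theorem pvAscend_top (n : Int) :
    1 ≤ (pvAscendF (n.toNat + 1) n 1 1).2 ∧
    (pvAscendF (n.toNat + 1) n 1 1).1 = factI (pvAscendF (n.toNat + 1) n 1 1).2 ∧
    n < factI ((pvAscendF (n.toNat + 1) n 1 1).2 + 1) ∧
    ((pvAscendF (n.toNat + 1) n 1 1).2 = 1 ∨ (pvAscendF (n.toNat + 1) n 1 1).1 ≤ n) :=
  pvAscendF_spec (n.toNat + 1) n 1 1 (le_refl 1) (le_refl 1) (by decide) (Or.inl rfl) (by omega)

-- unrolling A one level, under the bounds that pin down the inner loop's result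
theorem pvFuncF_step (fuel : Nat) (n prev : Int) (i : Nat)
    (hfuel : pvMu n prev < fuel) (hb : ¬(n = 1 ∨ n = 0 ∨ n = 2))
    (h1 : 1 ≤ i) (h2 : (Nat.factorial i : Int) ≤ n)
    (h3 : n < (Nat.factorial (i + 1) : Int)) :
    pvFuncF fuel n prev = if (i : Int) = prev then "NO"
                  else pvFuncF (fuel - 1) (n - (Nat.factorial i : Int)) (i : Int) := by
  have hsp := pvAscend_top n
  have heq : (pvAscendF (n.toNat + 1) n 1 1).2 = (i : Int) := by
    refine pv_unique n _ _ hsp.1 (by exact_mod_cast h1) hsp.2.2.1 ?_ ?_ (Or.inr ?_)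
    · rcases hsp.2.2.2 with h | h
      · exact Or.inl h
      · exact Or.inr (hsp.2.1 ▸ h)
    · have hcast : ((i : Int) + 1) = ((i + 1 : Nat) : Int) := by push_cast; ring
      rw [hcast, factI_cast]
      exact h3
    · rw [factI_cast]; exact h2
  have hf1 : (pvAscendF (n.toNat + 1) n 1 1).1 = (Nat.factorial i : Int) := by
    rw [hsp.2.1, heq, factI_cast]
  obtain ⟨fuel', rfl⟩ : ∃ k, fuel = k + 1 := ⟨fuel - 1, by omega⟩
  rw [pvFuncF, if_neg hb]
  simp only [heq, hf1]
  rfl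

theorem pvFuncF_neg (fuel : Nat) (n prev : Int) (hn : n < 0)
    (hfuel : pvMu n prev < fuel) : pvFuncF fuel n prev = "NO" := by
  have hA : ∀ m : Int, m < 0 → pvAscendF (m.toNat + 1) m 1 1 = (1, 1) := by
    intro m hm
    have hz : m.toNat + 1 = 0 + 1 := by omega
    rw [hz, pvAscendF, if_neg (by omega)]
  by_cases hp : (1 : Int) = prev
  · obtain ⟨fuel', rfl⟩ : ∃ k, fuel = k + 1 := ⟨fuel - 1, by omega⟩
    rw [pvFuncF, if_neg (by omega)]
    simp only [hA n hn]
    rw [if_pos hp]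
  · have hfuel2 : 2 ≤ fuel := by
      unfold pvMu at hfuel
      split_ifs at hfuel <;> omega
    obtain ⟨fuel', rfl⟩ : ∃ k, fuel = k + 2 := ⟨fuel - 2, by omega⟩
    rw [pvFuncF, if_neg (by omega)]
    simp only [hA n hn]
    rw [if_neg hp, pvFuncF, if_neg (by omega)]
    simp only [hA (n - 1) (by omega)]
    simp

theorem pv_getLastD (l : List Int) (hl : 1 ≤ l.length) :
    l.getLastD 1 = l.getD (l.length - 1) 0 := by
  rw [List.getLastD_eq_getLast?, List.getLast?_eq_getElem?, List.getD_eq_getElem?_getD]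
  rw [List.getElem?_eq_getElem (show l.length - 1 < l.length by omega)]
  rfl

theorem pv_fact_pred (L : Nat) (hL : 1 ≤ L) :
    Nat.factorial L = L * Nat.factorial (L - 1) := by
  obtain ⟨k, hk⟩ : ∃ k, L = k + 1 := ⟨L - 1, by omega⟩
  subst hk
  simp [Nat.factorial_succ]

theorem pvBuildF_spec : ∀ (fuel : Nat) (n : Int) (facts : List Int),
    2 ≤ facts.length →
    (∀ m : Nat, m < facts.length → facts.getD m 0 = (Nat.factorial m : Int)) →
    (n + 1 - facts.getLastD 1).toNat < fuel →
    2 ≤ (pvBuildF fuel n facts).length ∧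
    (∀ m : Nat, m < (pvBuildF fuel n facts).length →
      (pvBuildF fuel n facts).getD m 0 = (Nat.factorial m : Int)) ∧
    n < (Nat.factorial (pvBuildF fuel n facts).length : Int) := by
  intro fuel
  induction fuel with
  | zero => intro n facts h2 hp hm; omega
  | succ fuel ih =>
    intro n facts h2 hp hm
    have hlast : facts.getLastD 1 = (Nat.factorial (facts.length - 1) : Int) := by
      rw [pv_getLastD facts (by omega)]
      exact hp (facts.length - 1) (by omega)
    have hlpos : 1 ≤ facts.getLastD 1 := by
      rw [hlast]
      have := Nat.factorial_pos (facts.length - 1)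
      omega
    rw [pvBuildF]
    by_cases hc : facts.getLastD 1 * (facts.length : Int) ≤ n
    · rw [if_pos hc]
      have hlen2 : (2 : Int) ≤ (facts.length : Int) := by exact_mod_cast h2
      have hgrow : facts.getLastD 1 + 1 ≤ facts.getLastD 1 * (facts.length : Int) := by
        nlinarith
      apply ih
      · rw [List.length_append]; omega
      · intro m hm2
        rw [List.length_append, List.length_cons, List.length_nil] at hm2
        by_cases hm3 : m < facts.length
        · rw [List.getD_append _ _ _ _ hm3]
          exact hp m hm3
        · have hmeq : m = facts.length := by omega
          subst hmeq
          have hx : (facts ++ [facts.getLastD 1 * (facts.length : Int)]).getD facts.length 0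
              = facts.getLastD 1 * (facts.length : Int) := by
            rw [List.getD_eq_getElem?_getD, List.getElem?_concat_length]
            rfl
          rw [hx, hlast, pv_fact_pred facts.length (by omega)]
          push_cast
          ring
      · rw [List.getLastD_concat]
        omega
    · rw [if_neg hc]
      refine ⟨h2, hp, ?_⟩
      rw [hlast] at hc
      have hcast : (Nat.factorial facts.length : Int)
          = (Nat.factorial (facts.length - 1) : Int) * (facts.length : Int) := by
        rw [pv_fact_pred facts.length (by omega)]
        push_cast
        ring
      omega

theorem pvScan_eq (facts : List Int)
    (hp : ∀ m : Nat, m < facts.length → facts.getD m 0 = (Nat.factorial m : Int)) :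
    ∀ (j : Nat) (n prev : Int) (fuel : Nat), j < facts.length →
      n < (Nat.factorial (j + 1) : Int) → ¬(n = 1 ∨ n = 0 ∨ n = 2) →
      pvMu n prev < fuel →
      pvScan facts j n prev = pvFuncF fuel n prev := by
  intro j
  induction j with
  | zero =>
    intro n prev fuel hj hn hb hfuel
    have hneg : n < 0 := by
      simp [Nat.factorial] at hn
      omega
    rw [pvFuncF_neg fuel n prev hneg hfuel]
    rfl
  | succ j' ih =>
    intro n prev fuel hj hn hb hfuel
    have hf : facts.getD (j' + 1) 0 = (Nat.factorial (j' + 1) : Int) := hp _ hj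
    have hfpos : 1 ≤ (Nat.factorial (j' + 1) : Int) := by
      have := Nat.factorial_pos (j' + 1)
      omega
    simp only [pvScan, hf]
    by_cases hle : (Nat.factorial (j' + 1) : Int) ≤ n
    · rw [if_pos hle]
      rw [pvFuncF_step fuel n prev (j' + 1) hfuel hb (by omega) hle hn]
      by_cases hprev : ((j' + 1 : Nat) : Int) = prev
      · rw [if_pos hprev, if_pos hprev]
      · rw [if_neg hprev, if_neg hprev]
        have hfuel' : pvMu (n - (Nat.factorial (j' + 1) : Int)) ((j' + 1 : Nat) : Int) < fuel - 1 := by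
          unfold pvMu at hfuel ⊢
          split_ifs at hfuel ⊢ <;> omega
        by_cases hbase : n - (Nat.factorial (j' + 1) : Int) = 0 ∨
            n - (Nat.factorial (j' + 1) : Int) = 1 ∨ n - (Nat.factorial (j' + 1) : Int) = 2
        · rw [if_pos hbase]
          obtain ⟨k, hk⟩ : ∃ k, fuel - 1 = k + 1 := ⟨fuel - 2, by omega⟩
          rw [hk, pvFuncF, if_pos (by omega)]
        · rw [if_neg hbase]
          by_cases hrep : (Nat.factorial (j' + 1) : Int) ≤ n - (Nat.factorial (j' + 1) : Int)
          · rw [if_pos hrep]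
            rw [pvFuncF_step (fuel - 1) (n - (Nat.factorial (j' + 1) : Int))
                  ((j' + 1 : Nat) : Int) (j' + 1) hfuel' (by omega) (by omega) hrep (by omega)]
            rw [if_pos rfl]
          · rw [if_neg hrep]
            exact ih (n - (Nat.factorial (j' + 1) : Int)) ((j' + 1 : Nat) : Int) (fuel - 1)
              (by omega) (by omega) (by omega) hfuel'
    · rw [if_neg hle]
      exact ih n prev fuel (by omega) (by omega) hb hfuel

-- ===== VERDICT (by name: the statement is the Claim_ definition above) =====
theorem func_spec : Claim_equal_func := by
  unfold Claim_equal_func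
  intro n dd _
  unfold Spec_func func_alt func
  by_cases hb : n = 0 ∨ n = 1 ∨ n = 2
  · rw [if_pos hb]
    obtain ⟨k, hk⟩ : ∃ k, n.toNat + 3 = k + 1 := ⟨n.toNat + 2, by omega⟩
    rw [hk, pvFuncF, if_pos (by tauto)]
  · rw [if_neg hb]
    have hpre : ∀ m : Nat, m < ([1, 1] : List Int).length →
        ([1, 1] : List Int).getD m 0 = (Nat.factorial m : Int) := by
      intro m hm
      simp only [List.length_cons, List.length_nil] at hm
      interval_cases m <;> rfl
    have hsp := pvBuildF_spec (n.toNat + 2) n [1, 1] (by decide) hpre (by have hone : ([1, 1] : List Int).getLastD 1 = 1 := rfl; rw [hone]; omega)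
    set L := (pvBuildF (n.toNat + 2) n [1, 1]).length with hL
    have hLL : L - 1 + 1 = L := by omega
    have hfuel : pvMu n dd < n.toNat + 3 := by
      unfold pvMu
      split_ifs <;> omega
    exact (pvScan_eq _ hsp.2.1 (L - 1) n dd (n.toNat + 3) (by omega)
      (by rw [hLL]; exact hsp.2.2) (by tauto) hfuel).symm
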